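-- pv_equiv track=rewrite | github.com/hyanghe/Model | TFRecords/TFRecord_Text.py | create_dummy_text_dataset
-- ===== SOURCE A (Python) =====
-- def create_dummy_text_dataset(size:int=100):
--     text_data = []
--     labels = []
--
--     for i in range(size):
--         if i%2 == 0:
--             text = 'Hey, this is a sample text. We can use many different symbols.'
--             label = 0
--         else:
--             text = 'a point is exactly what the folks think of it; after Gauss.'
--             label = 1
--
--         text_data.append(text)
--         labels.append(label)
--     return text_data, labels
-- ===== SOURCE B (Python) =====
-- def create_dummy_text_dataset(size: int = 100):
--     text_block = ['Hey, this is a sample text. We can use many different symbols.',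
--                   'a point is exactly what the folks think of it; after Gauss.']
--     label_block = [0, 1]
--     reps = max(size, 0) // 2
--     text_data = text_block * reps
--     labels = label_block * reps
--     if size > 0 and size % 2 == 1:
--         text_data.append(text_block[0])
--         labels.append(0)
--     return text_data, labels
-- ===== Notes on version B (the rewrite author's own statement) =====
-- stated objective: alternative
-- what changed: Replaces the per-index loop with branching by replicating the two-element (text,label) block max(size,0)//2 times and appending the single even-index element when size is positive and odd.
import Mathlib
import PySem

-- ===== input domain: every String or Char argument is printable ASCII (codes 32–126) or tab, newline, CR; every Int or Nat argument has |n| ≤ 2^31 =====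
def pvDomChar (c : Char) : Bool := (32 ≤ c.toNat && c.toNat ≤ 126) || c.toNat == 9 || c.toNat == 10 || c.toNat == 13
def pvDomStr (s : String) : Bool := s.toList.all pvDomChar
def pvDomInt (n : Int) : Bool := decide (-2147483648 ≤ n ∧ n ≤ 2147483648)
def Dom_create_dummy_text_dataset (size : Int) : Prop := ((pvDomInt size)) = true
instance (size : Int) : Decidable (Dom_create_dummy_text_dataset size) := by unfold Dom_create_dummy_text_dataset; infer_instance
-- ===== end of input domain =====

-- B builds the result by replicating the two-element (text,label) block max(size,0)//2 times
-- plus an odd-tail fixup, instead of A's per-index loop with a parity branch (alternative decomposition).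


-- ===== PORT A =====
def pvTextEven : String := "Hey, this is a sample text. We can use many different symbols."
def pvTextOdd : String := "a point is exactly what the folks think of it; after Gauss."

def create_dummy_text_dataset (size : Int) : List String × List Int :=
  (PySem.List.pyRange 0 size 1).foldl
    (fun (st : List String × List Int) i =>
      let tl : String × Int :=
        if PySem.Int.mod i 2 = 0 then (pvTextEven, 0) else (pvTextOdd, 1)
      (st.1 ++ [tl.1], st.2 ++ [tl.2]))
    ([], [])

-- ===== PORT B =====
def create_dummy_text_dataset_alt (size : Int) : List String × List Int :=
  let textBlock : List String := [pvTextEven, pvTextOdd]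
  let labelBlock : List Int := [0, 1]
  let reps : Nat := (PySem.Int.floordiv (max size 0) 2).toNat
  let text_data := (List.replicate reps textBlock).flatten
  let labels := (List.replicate reps labelBlock).flatten
  if size > 0 ∧ PySem.Int.mod size 2 = 1 then
    (text_data ++ [pvTextEven], labels ++ [0])
  else
    (text_data, labels)

-- ===== PRECONDITION & SPEC =====
def Spec_create_dummy_text_dataset (size : Int) (out : List String × List Int) : Prop := out = create_dummy_text_dataset_alt size
instance (size : Int) (out : List String × List Int) : Decidable (Spec_create_dummy_text_dataset size out) := by unfold Spec_create_dummy_text_dataset; infer_instance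

-- ===== CLAIM (what is proved, stated in full; the proofs are below) =====
def Claim_equal_create_dummy_text_dataset : Prop := ∀ (size : Int), Dom_create_dummy_text_dataset size → Spec_create_dummy_text_dataset size (create_dummy_text_dataset size)

-- ===== LEMMAS AND PROOFS =====

lemma pvA_nat (n : Nat) :
    create_dummy_text_dataset (n : Int) = create_dummy_text_dataset_alt (n : Int) := by
  induction n with
  | zero => decide
  | succ n ih =>
    have hstep : create_dummy_text_dataset ((n + 1 : Nat) : Int)
        = (let tl : String × Int :=
             if PySem.Int.mod (n : Int) 2 = 0 then (pvTextEven, 0) else (pvTextOdd, 1)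
           ((create_dummy_text_dataset (n : Int)).1 ++ [tl.1],
            (create_dummy_text_dataset (n : Int)).2 ++ [tl.2])) := by
      simp only [create_dummy_text_dataset]
      rw [show ((n + 1 : Nat) : Int) = (n : Int) + 1 by push_cast; ring,
          PySem.List.pyRange_one_succ_right (by omega : (0:Int) ≤ (n : Int)),
          List.foldl_append]
      simp
    have hmod : PySem.Int.mod (n : Int) 2 = ((n % 2 : Nat) : Int) := by
      exact_mod_cast PySem.Int.mod_natCast n 2
    have hmod1 : PySem.Int.mod ((n+1 : Nat) : Int) 2 = (((n+1) % 2 : Nat) : Int) := by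
      exact_mod_cast PySem.Int.mod_natCast (n+1) 2
    rw [hstep, ih]
    rcases Nat.even_or_odd n with he | ho
    · -- n even: same reps, tail [tA] appears
      have h2 : n % 2 = 0 := Nat.even_iff.mp he
      have h2' : (n+1) % 2 = 1 := by omega
      simp only [create_dummy_text_dataset_alt, hmod, hmod1, h2, h2', pysem]
      have hk : (max ((n:Int) + 1) 0 / 2).toNat = ((n:Int) / 2).toNat := by omega
      simp [hk]
    · -- n odd: reps grows by one, tail disappears
      have h2 : n % 2 = 1 := Nat.odd_iff.mp ho
      have h2' : (n+1) % 2 = 0 := by omega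
      simp only [create_dummy_text_dataset_alt, hmod, hmod1, h2, h2', pysem]
      have hk : (max ((n:Int) + 1) 0 / 2).toNat = ((n:Int) / 2).toNat + 1 := by omega
      have hpos : 0 < n := by omega
      simp [hk, hpos, List.replicate_succ', List.flatten_append]

lemma pvA_nonpos (size : Int) (h : size ≤ 0) :
    create_dummy_text_dataset size = create_dummy_text_dataset_alt size := by
  have hr : PySem.List.pyRange 0 size 1 = [] := by
    rw [PySem.List.pyRange_one]
    simp
    omega
  have hmax : max size 0 = 0 := by omega
  simp [create_dummy_text_dataset, create_dummy_text_dataset_alt, hr, hmax]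
  omega

-- ===== VERDICT (by name: the statement is the Claim_ definition above) =====
theorem create_dummy_text_dataset_spec : Claim_equal_create_dummy_text_dataset := by
  intro size _
  unfold Spec_create_dummy_text_dataset
  by_cases h : size ≤ 0
  · exact pvA_nonpos size h
  · obtain ⟨n, rfl⟩ := Int.eq_ofNat_of_zero_le (by omega : (0:Int) ≤ size)
    exact pvA_nat n
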